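-- pv_equiv track=rewrite | github.com/Kaleswarydon/AdventOfCode | Day01/puzzle01.py | input_prep2
-- ===== SOURCE A (Python) =====
-- def input_prep2(l: list):
--     word_to_number = {'one': '1',
--                        'two': '2',
--                        'three': '3',
--                        'four': '4',
--                        'five': '5',
--                        'six': '6',
--                        'seven': '7',
--                        'eight': '8',
--                        'nine': '9'}
--     res = []
--     for d in l:
--         temp = d
--         minmax = {}
--         for n in word_to_number.keys():
--             for z in range(len(temp)):
--                 if temp.find(n, z) != -1:
--                     minmax.update({temp.find(n, z): word_to_number.get(n)})
--         if minmax: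
--             maxpos = max(minmax.keys())
--             minpos = min(minmax.keys())
--             temp = temp[:minpos] + str(minmax.get(minpos)) + temp[minpos:]
--             if len(minmax) > 1:
--                 temp = temp[:maxpos + 1] + str(minmax.get(maxpos)) + temp[maxpos + 1:]
--         res.append(temp)
--     return res
-- ===== SOURCE B (Python) =====
-- WORDS = [('one', '1'), ('two', '2'), ('three', '3'), ('four', '4'),
--          ('five', '5'), ('six', '6'), ('seven', '7'), ('eight', '8'),
--          ('nine', '9')]
--
--
-- def _scan_left(s):
--     for i in range(len(s)):
--         for w, d in WORDS:
--             if s.startswith(w, i):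
--                 return i, d
--     return None
--
--
-- def _scan_right(s):
--     for i in range(len(s) - 1, -1, -1):
--         for w, d in WORDS:
--             if s.startswith(w, i):
--                 return i, d
--     return None
--
--
-- def _one(s):
--     hit = _scan_left(s)
--     if hit is None:
--         return s
--     i, di = hit
--     j, dj = _scan_right(s)
--     if j != i:
--         s = s[:j] + dj + s[j:]
--     return s[:i] + di + s[i:]
--
--
-- def input_prep2(l: list):
--     return [_one(s) for s in l]
-- ===== Notes on version B (the rewrite author's own statement) =====
-- stated objective: simpler
-- what changed: Replaces A's word-by-word nested find loop that records every occurrence position in a dict and then takes min/max of the keys with two directed scans (first index from the left / from the right where any number word starts), inserting right-then-left so no position shift arithmetic is needed.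
import Mathlib
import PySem

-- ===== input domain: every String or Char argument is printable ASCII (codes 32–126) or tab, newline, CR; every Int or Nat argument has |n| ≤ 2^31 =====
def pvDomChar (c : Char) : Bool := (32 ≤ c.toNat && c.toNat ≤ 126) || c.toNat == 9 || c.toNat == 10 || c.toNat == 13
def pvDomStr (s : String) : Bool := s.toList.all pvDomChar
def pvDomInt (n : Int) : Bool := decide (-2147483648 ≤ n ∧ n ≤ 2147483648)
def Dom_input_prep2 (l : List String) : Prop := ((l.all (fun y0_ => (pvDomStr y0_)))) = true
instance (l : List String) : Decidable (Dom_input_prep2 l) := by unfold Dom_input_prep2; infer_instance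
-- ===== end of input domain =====

-- B replaces A's per-word occurrence dict (every find position, then min/max of keys) with two
-- directed scans for the first/last index where a number word starts (objective: simpler).

-- ===== PORT A =====
-- the word → digit table, on the List Char side (strings are proved on .toList)
def pvWords : List (List Char × List Char) :=
  [(['o','n','e'], ['1']), (['t','w','o'], ['2']), (['t','h','r','e','e'], ['3']),
   (['f','o','u','r'], ['4']), (['f','i','v','e'], ['5']), (['s','i','x'], ['6']),
   (['s','e','v','e','n'], ['7']), (['e','i','g','h','t'], ['8']), (['n','i','n','e'], ['9'])]

-- inner loop of A: 'for z in range(len(temp)): if temp.find(n, z) != -1: minmax.update({…})'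
def pvAInner (cs : List Char) (n : List Char × List Char) (mm : PySem.Dict Int (List Char)) :
    PySem.Dict Int (List Char) :=
  (PySem.List.pyRange 0 (cs.length : Int) 1).foldl
    (fun mm z =>
      if PySem.Chars.findFrom cs n.1 z ≠ -1 then
        mm.insert (PySem.Chars.findFrom cs n.1 z) n.2
      else mm) mm

-- A's loop body for one string
def pvAOne (cs : List Char) : List Char :=
  let minmax := pvWords.foldl (fun mm n => pvAInner cs n mm) PySem.Dict.empty
  if minmax.size ≠ 0 then
    match PySem.List.max? minmax.keys (fun x => x), PySem.List.min? minmax.keys (fun x => x) with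
    | some maxpos, some minpos =>
      let temp := PySem.Chars.slice cs none (some minpos) ++ minmax.getD minpos [] ++
        PySem.Chars.slice cs (some minpos) none
      if minmax.size > 1 then
        PySem.Chars.slice temp none (some (maxpos + 1)) ++ minmax.getD maxpos [] ++
          PySem.Chars.slice temp (some (maxpos + 1)) none
      else temp
    | _, _ => cs  -- unreachable: max/min of the nonempty key list are `some`
  else cs

def input_prep2 (l : List String) : List String :=
  l.foldl (fun res d => res ++ [String.ofList (pvAOne d.toList)]) []

-- ===== PORT B =====
-- Source B's inner 'for w, d in WORDS: if s.startswith(w, i)' loop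
def pvHit (cs : List Char) (i : Nat) : Option (List Char × List Char) :=
  pvWords.find? (fun w => PySem.Chars.startswith (List.drop i cs) w.1)

-- Source B's _scan_left: first index ≥ i where a word starts
def pvScanL (cs : List Char) (i : Nat) : Option (Nat × List Char) :=
  if _h : i < cs.length then
    match pvHit cs i with
    | some w => some (i, w.2)
    | none => pvScanL cs (i + 1)
  else none
termination_by cs.length - i

-- Source B's _scan_right: first index ≤ t (counting down) where a word starts
def pvScanR (cs : List Char) : Nat → Option (Nat × List Char)
  | 0 => (pvHit cs 0).map (fun w => (0, w.2))
  | i + 1 =>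
    match pvHit cs (i + 1) with
    | some w => some (i + 1, w.2)
    | none => pvScanR cs i

-- Source B's _one
def pvBOne (cs : List Char) : List Char :=
  match pvScanL cs 0 with
  | none => cs
  | some (i, di) =>
    match pvScanR cs (cs.length - 1) with
    | none => cs  -- unreachable: a left hit implies a right hit
    | some (j, dj) =>
      let t := if j ≠ i then List.take j cs ++ dj ++ List.drop j cs else cs
      List.take i t ++ di ++ List.drop i t

def input_prep2_alt (l : List String) : List String :=
  l.map (fun s => String.ofList (pvBOne s.toList))

-- ===== PRECONDITION & SPEC =====
def Spec_input_prep2 (l : List String) (out : List String) : Prop := out = input_prep2_alt l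
instance (l : List String) (out : List String) : Decidable (Spec_input_prep2 l out) := by
  unfold Spec_input_prep2; infer_instance

-- ===== CLAIM (what is proved, stated in full; the proofs are below) =====
def Claim_equal_input_prep2 : Prop :=
  ∀ (l : List String), Dom_input_prep2 l → Spec_input_prep2 l (input_prep2 l)

-- ===== LEMMAS AND PROOFS =====

-- "some word of the table starts at position p of cs" as a Bool on an Int position
def pvPosB (cs w : List Char) (p : Int) : Bool :=
  decide (0 ≤ p) && PySem.Chars.startswith (List.drop p.toNat cs) w

lemma pv_words_ne_nil : ∀ w ∈ pvWords, w.1 ≠ [] := by decide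

lemma pv_words_digit : ∀ w ∈ pvWords, w.2.length = 1 := by decide

lemma pv_words_prefix : ∀ w1 ∈ pvWords, ∀ w2 ∈ pvWords, w1.1 <+: w2.1 → w1 = w2 := by decide

-- no word of the table is a prefix of another, so at most one word starts at a given position
lemma pv_uniq {w1 w2 : List Char × List Char} (h1 : w1 ∈ pvWords) (h2 : w2 ∈ pvWords)
    {t : List Char} (p1 : w1.1 <+: t) (p2 : w2.1 <+: t) : w1 = w2 := by
  rcases List.prefix_or_prefix_of_prefix p1 p2 with h | h
  · exact pv_words_prefix w1 h1 w2 h2 h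
  · exact (pv_words_prefix w2 h2 w1 h1 h).symm

lemma pvHit_eq_none_of_ge {cs : List Char} {i : Nat} (h : cs.length ≤ i) : pvHit cs i = none := by
  unfold pvHit
  rw [List.find?_eq_none]
  intro w hw hsw
  have hpre := (PySem.Chars.startswith_iff _ _).mp hsw
  rw [List.drop_eq_nil_of_le h] at hpre
  exact pv_words_ne_nil w hw (List.prefix_nil.mp hpre)

lemma pvHit_some {cs : List Char} {i : Nat} {w : List Char × List Char}
    (h : pvHit cs i = some w) : w ∈ pvWords ∧ w.1 <+: List.drop i cs ∧ i < cs.length := by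
  unfold pvHit at h
  have hmem := List.mem_of_find?_eq_some h
  have hsw := (PySem.Chars.startswith_iff _ _).mp
    (List.find?_some (p := fun w : List Char × List Char =>
      PySem.Chars.startswith (List.drop i cs) w.1) h)
  refine ⟨hmem, hsw, ?_⟩
  by_contra hlen
  rw [List.drop_eq_nil_of_le (by omega)] at hsw
  exact pv_words_ne_nil w hmem (List.prefix_nil.mp hsw)

lemma pvPosB_natCast (cs w : List Char) (i : Nat) :
    pvPosB cs w (i : Int) = PySem.Chars.startswith (List.drop i cs) w := by
  simp [pvPosB]

-- characterization of A's inner z-loop for one word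
lemma pv_inner_get?_aux (cs w d : List Char) (hw : w ≠ []) :
    ∀ (k z : Nat), cs.length - z = k → z ≤ cs.length →
    ∀ (mm : PySem.Dict Int (List Char)) (p : Int),
    ((PySem.List.pyRange (z : Int) (cs.length : Int) 1).foldl
      (fun mm zz => if PySem.Chars.findFrom cs w zz ≠ -1 then
          mm.insert (PySem.Chars.findFrom cs w zz) d else mm) mm).get? p
    = if ((z : Int) ≤ p ∧ pvPosB cs w p = true) then some d else mm.get? p := by
  intro k
  induction k with
  | zero =>
    intro z hk hz mm p
    have hz' : z = cs.length := by omega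
    subst hz'
    rw [PySem.List.pyRange_one_eq_nil (le_refl _)]
    simp only [List.foldl_nil]
    rw [if_neg]
    rintro ⟨hle, hpos⟩
    simp only [pvPosB, Bool.and_eq_true, decide_eq_true_eq] at hpos
    have hpre := (PySem.Chars.startswith_iff _ _).mp hpos.2
    rw [List.drop_eq_nil_of_le (by omega)] at hpre
    exact hw (List.prefix_nil.mp hpre)
  | succ k ih =>
    intro z hk hz mm p
    have hzlt : z < cs.length := by omega
    rw [PySem.List.pyRange_one_cons (by exact_mod_cast hzlt)]
    simp only [List.foldl_cons]
    have hcast : ((z : Int) + 1) = ((z + 1 : Nat) : Int) := by push_cast; ring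
    rw [hcast]
    by_cases hf : PySem.Chars.findFrom cs w (z : Int) = -1
    · -- no occurrence at or after z
      have hnof := (PySem.Chars.findFrom_natCast_eq_neg_one_iff cs w z (by omega)).mp hf
      rw [if_neg (by simp [hf])]
      rw [ih (z + 1) (by omega) (by omega) mm p]
      have himp : ∀ q : Int, (z : Int) ≤ q → pvPosB cs w q = true → False := by
        intro q hle hpos
        simp only [pvPosB, Bool.and_eq_true, decide_eq_true_eq] at hpos
        have hpre := (PySem.Chars.startswith_iff _ _).mp hpos.2
        have hq : q.toNat = z + (q.toNat - z) := by omega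
        rw [hq, ← List.drop_drop] at hpre
        exact hnof (hpre.isInfix.trans (List.drop_suffix _ _).isInfix)
      rw [if_neg, if_neg]
      · rintro ⟨h1, h2⟩; exact himp p h1 h2
      · rintro ⟨h1, h2⟩; exact himp p (by push_cast at h1 ⊢; omega) h2
    · -- first occurrence at or after z is q := findFrom cs w z
      obtain ⟨hq1, hq2, hq3⟩ := PySem.Chars.findFrom_natCast_spec cs w z (by omega) hf
      set q := PySem.Chars.findFrom cs w (z : Int) with hqdef
      have hq0 : (0 : Int) ≤ q := le_trans (by positivity) hq1
      have hposq : pvPosB cs w q = true := by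
        simp only [pvPosB, Bool.and_eq_true, decide_eq_true_eq]
        exact ⟨hq0, (PySem.Chars.startswith_iff _ _).mpr hq2⟩
      rw [if_pos (by simp [hf])]
      rw [ih (z + 1) (by omega) (by omega) (mm.insert q d) p]
      by_cases hc : ((z : Int) ≤ p ∧ pvPosB cs w p = true)
      · rw [if_pos hc]
        by_cases hp1 : ((z + 1 : Nat) : Int) ≤ p
        · rw [if_pos ⟨hp1, hc.2⟩]
        · -- p = z, and then p = q by minimality
          have hpz : p = (z : Int) := by push_cast at hp1; omega
          have hswz : w <+: List.drop z cs := by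
            have := hc.2
            simp only [pvPosB, Bool.and_eq_true, decide_eq_true_eq] at this
            have h2 := (PySem.Chars.startswith_iff _ _).mp this.2
            rw [hpz, Int.toNat_natCast] at h2
            exact h2
          have hqz : q.toNat ≤ z := by
            by_contra hgt
            exact hq3 z (le_refl _) (by omega) hswz
          have hpq : p = q := by omega
          rw [if_neg (by rintro ⟨h1, _⟩; push_cast at h1; omega), hpq,
            PySem.Dict.get?_insert_self]
      · rw [if_neg hc, if_neg (by rintro ⟨h1, h2⟩; exact hc ⟨by push_cast at h1 ⊢; omega, h2⟩)]
        apply PySem.Dict.get?_insert_of_ne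
        intro hpq
        exact hc ⟨hpq ▸ hq1, hpq ▸ hposq⟩

lemma pv_inner_get? (cs : List Char) (n : List Char × List Char) (hn : n ∈ pvWords)
    (mm : PySem.Dict Int (List Char)) (p : Int) :
    (pvAInner cs n mm).get? p =
      if pvPosB cs n.1 p = true then some n.2 else mm.get? p := by
  unfold pvAInner
  have h0 : (0 : Int) = ((0 : Nat) : Int) := by norm_num
  rw [h0, pv_inner_get?_aux cs n.1 n.2 (pv_words_ne_nil n hn) (cs.length - 0) 0 rfl
    (Nat.zero_le _) mm p]
  by_cases hc : pvPosB cs n.1 p = true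
  · rw [if_pos ⟨by
      simp only [pvPosB, Bool.and_eq_true, decide_eq_true_eq] at hc
      exact_mod_cast hc.1, hc⟩, if_pos hc]
  · rw [if_neg (by rintro ⟨_, h2⟩; exact hc h2), if_neg hc]

-- characterization of A's outer word loop
lemma pv_outer_get? (cs : List Char) :
    ∀ (ws : List (List Char × List Char)), (∀ w ∈ ws, w ∈ pvWords) →
    ∀ (mm : PySem.Dict Int (List Char)) (p : Int),
    (ws.foldl (fun mm n => pvAInner cs n mm) mm).get? p =
      match ws.find? (fun w => pvPosB cs w.1 p) with
      | some w => some w.2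
      | none => mm.get? p := by
  intro ws
  induction ws with
  | nil => intro _ mm p; simp
  | cons w0 ws' ih =>
    intro hws mm p
    simp only [List.foldl_cons, List.find?_cons]
    rw [ih (fun w hw => hws w (List.mem_cons_of_mem _ hw)) (pvAInner cs w0 mm) p]
    by_cases h0 : pvPosB cs w0.1 p = true
    · rw [h0]
      cases hfind : ws'.find? (fun w => pvPosB cs w.1 p) with
      | none =>
        simp only
        rw [pv_inner_get? cs w0 (hws w0 List.mem_cons_self) mm p, if_pos h0]
      | some w =>
        simp only
        have hwmem := hws w (List.mem_cons_of_mem _ (List.mem_of_find?_eq_some hfind))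
        have hwpos := List.find?_some hfind
        simp only [pvPosB, Bool.and_eq_true, decide_eq_true_eq] at h0 hwpos
        have : w = w0 := pv_uniq hwmem (hws w0 List.mem_cons_self)
          ((PySem.Chars.startswith_iff _ _).mp hwpos.2)
          ((PySem.Chars.startswith_iff _ _).mp h0.2)
        rw [this]
    · rw [Bool.not_eq_true] at h0
      rw [h0]
      cases hfind : ws'.find? (fun w => pvPosB cs w.1 p) with
      | none =>
        simp only
        rw [pv_inner_get? cs w0 (hws w0 List.mem_cons_self) mm p, if_neg (by simp [h0])]
      | some w => simp only

-- the dict A builds for a string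
def pvD (cs : List Char) : PySem.Dict Int (List Char) :=
  pvWords.foldl (fun mm n => pvAInner cs n mm) PySem.Dict.empty

lemma pvD_get? (cs : List Char) (p : Int) :
    (pvD cs).get? p =
      match pvWords.find? (fun w => pvPosB cs w.1 p) with
      | some w => some w.2
      | none => none := by
  unfold pvD
  rw [pv_outer_get? cs pvWords (fun _ h => h) PySem.Dict.empty p]
  cases pvWords.find? (fun w => pvPosB cs w.1 p) with
  | none => simp [PySem.Dict.get?_empty]
  | some w => rfl

lemma pvD_get?_natCast (cs : List Char) (i : Nat) :
    (pvD cs).get? (i : Int) = (pvHit cs i).map (·.2) := by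
  rw [pvD_get?]
  have hpred : (fun w : List Char × List Char => pvPosB cs w.1 (i : Int)) =
      (fun w : List Char × List Char => PySem.Chars.startswith (List.drop i cs) w.1) := by
    funext w; exact pvPosB_natCast cs w.1 i
  rw [hpred]
  unfold pvHit
  cases pvWords.find? (fun w => PySem.Chars.startswith (List.drop i cs) w.1) <;> rfl

-- a key with a value in A's dict is a hit position
lemma pvD_get?_isSome {cs : List Char} {p : Int} (h : ((pvD cs).get? p).isSome) :
    0 ≤ p ∧ (pvHit cs p.toNat).isSome := by
  rw [pvD_get?] at h
  cases hfind : pvWords.find? (fun w => pvPosB cs w.1 p) with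
  | none => rw [hfind] at h; simp at h
  | some w =>
    have hwpos := List.find?_some hfind
    simp only [pvPosB, Bool.and_eq_true, decide_eq_true_eq] at hwpos
    refine ⟨hwpos.1, ?_⟩
    unfold pvHit
    rw [List.find?_isSome]
    exact ⟨w, List.mem_of_find?_eq_some hfind, hwpos.2⟩

-- Nodup keys through A's conditional-insert loops
lemma pv_nodup_cond_foldl {α : Type} (l : List α) (key : α → Int) (v : List Char)
    (c : α → Prop) [DecidablePred c] :
    ∀ (mm : PySem.Dict Int (List Char)), mm.keys.Nodup →
    ((l.foldl (fun mm x => if c x then mm.insert (key x) v else mm) mm).keys).Nodup := by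
  induction l with
  | nil => intro mm h; exact h
  | cons x l ih =>
    intro mm h
    simp only [List.foldl_cons]
    apply ih
    split_ifs with hc
    · exact PySem.Dict.nodup_keys_insert mm (key x) v h
    · exact h

lemma pvD_nodup (cs : List Char) : (pvD cs).keys.Nodup := by
  unfold pvD
  have : ∀ (ws : List (List Char × List Char)) (mm : PySem.Dict Int (List Char)),
      mm.keys.Nodup → ((ws.foldl (fun mm n => pvAInner cs n mm) mm).keys).Nodup := by
    intro ws
    induction ws with
    | nil => intro mm h; exact h
    | cons n ws ih =>
      intro mm h
      simp only [List.foldl_cons]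
      apply ih
      unfold pvAInner
      exact pv_nodup_cond_foldl _ _ _ _ mm h
  apply this
  simp [PySem.Dict.empty, PySem.Dict.keys]

lemma pv_any_eq_find?_isSome {α : Type} (l : List α) (f : α → Bool) :
    l.any f = (l.find? f).isSome := by
  induction l with
  | nil => rfl
  | cons x l ih =>
    simp only [List.any_cons, List.find?_cons]
    cases hx : f x
    · simpa using ih
    · rfl

lemma pv_mem_keys_iff (d : PySem.Dict Int (List Char)) (k : Int) :
    k ∈ d.keys ↔ (d.get? k).isSome := by
  rw [← PySem.Dict.contains_iff_mem_keys]
  have : d.contains k = (d.get? k).isSome := by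
    simp only [PySem.Dict.contains, PySem.Dict.get?]
    rw [pv_any_eq_find?_isSome]
    cases d.items.find? fun p => p.1 == k <;> rfl
  rw [this]

lemma pv_size_eq (d : PySem.Dict Int (List Char)) : d.size = d.keys.length := by
  simp [PySem.Dict.size, PySem.Dict.keys]

lemma pv_get?_of_size_zero {d : PySem.Dict Int (List Char)} (h : d.size = 0) (k : Int) :
    d.get? k = none := by
  obtain ⟨items⟩ := d
  cases items with
  | nil => rfl
  | cons hd tl => simp [PySem.Dict.size] at h

lemma pv_exists_of_size_ne_zero {d : PySem.Dict Int (List Char)} (h : d.size ≠ 0) :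
    ∃ k, (d.get? k).isSome := by
  obtain ⟨items⟩ := d
  cases items with
  | nil => simp [PySem.Dict.size] at h
  | cons hd tl =>
    refine ⟨hd.1, ?_⟩
    simp [PySem.Dict.get?]

-- scan characterizations (B side)
lemma pvScanL_none {cs : List Char} :
    ∀ (k z : Nat), cs.length - z = k → pvScanL cs z = none →
    ∀ j, z ≤ j → pvHit cs j = none := by
  intro k
  induction k with
  | zero =>
    intro z hk _ j hj
    exact pvHit_eq_none_of_ge (by omega)
  | succ k ih =>
    intro z hk hs j hj
    have hzlt : z < cs.length := by omega
    rw [pvScanL, dif_pos hzlt] at hs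
    cases hhit : pvHit cs z with
    | some w => rw [hhit] at hs; simp at hs
    | none =>
      rw [hhit] at hs
      rcases Nat.eq_or_lt_of_le hj with rfl | hlt
      · exact hhit
      · exact ih (z + 1) (by omega) hs j (by omega)

lemma pvScanL_some {cs : List Char} :
    ∀ (k z : Nat) {i : Nat} {d : List Char}, cs.length - z = k → pvScanL cs z = some (i, d) →
    z ≤ i ∧ (∃ w, pvHit cs i = some w ∧ d = w.2) ∧ ∀ j, z ≤ j → j < i → pvHit cs j = none := by
  intro k
  induction k with
  | zero =>
    intro z i d hk hs
    rw [pvScanL, dif_neg (by omega)] at hs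
    simp at hs
  | succ k ih =>
    intro z i d hk hs
    have hzlt : z < cs.length := by omega
    rw [pvScanL, dif_pos hzlt] at hs
    cases hhit : pvHit cs z with
    | some w =>
      rw [hhit] at hs
      obtain ⟨rfl, rfl⟩ : z = i ∧ d = w.2 := by
        injection hs with h; injection h with h1 h2; exact ⟨h1, h2.symm⟩
      exact ⟨le_refl _, ⟨w, hhit, rfl⟩, fun j h1 h2 => by omega⟩
    | none =>
      rw [hhit] at hs
      obtain ⟨h1, h2, h3⟩ := ih (z + 1) (by omega) hs
      refine ⟨by omega, h2, fun j hj1 hj2 => ?_⟩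
      rcases Nat.eq_or_lt_of_le hj1 with rfl | hlt
      · exact hhit
      · exact h3 j (by omega) hj2

lemma pvScanR_none {cs : List Char} :
    ∀ (t : Nat), pvScanR cs t = none → ∀ k, k ≤ t → pvHit cs k = none := by
  intro t
  induction t with
  | zero =>
    intro hs k hk
    interval_cases k
    unfold pvScanR at hs
    cases hhit : pvHit cs 0 with
    | some w => rw [hhit] at hs; simp at hs
    | none => rfl
  | succ t ih =>
    intro hs k hk
    unfold pvScanR at hs
    cases hhit : pvHit cs (t + 1) with
    | some w => rw [hhit] at hs; simp at hs
    | none =>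
      rw [hhit] at hs
      rcases Nat.eq_or_lt_of_le hk with rfl | hlt
      · exact hhit
      · exact ih hs k (by omega)

lemma pvScanR_some {cs : List Char} :
    ∀ (t : Nat) {j : Nat} {d : List Char}, pvScanR cs t = some (j, d) →
    j ≤ t ∧ (∃ w, pvHit cs j = some w ∧ d = w.2) ∧ ∀ k, j < k → k ≤ t → pvHit cs k = none := by
  intro t
  induction t with
  | zero =>
    intro j d hs
    unfold pvScanR at hs
    cases hhit : pvHit cs 0 with
    | some w =>
      rw [hhit] at hs
      simp only [Option.map_some] at hs
      obtain ⟨rfl, rfl⟩ : 0 = j ∧ d = w.2 := by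
        injection hs with h; injection h with h1 h2; exact ⟨h1, h2.symm⟩
      exact ⟨le_refl _, ⟨w, hhit, rfl⟩, fun k h1 h2 => by omega⟩
    | none => rw [hhit] at hs; simp at hs
  | succ t ih =>
    intro j d hs
    unfold pvScanR at hs
    cases hhit : pvHit cs (t + 1) with
    | some w =>
      rw [hhit] at hs
      obtain ⟨rfl, rfl⟩ : t + 1 = j ∧ d = w.2 := by
        injection hs with h; injection h with h1 h2; exact ⟨h1, h2.symm⟩
      exact ⟨le_refl _, ⟨w, hhit, rfl⟩, fun k h1 h2 => by omega⟩
    | none =>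
      rw [hhit] at hs
      obtain ⟨h1, h2, h3⟩ := ih hs
      refine ⟨by omega, h2, fun k hk1 hk2 => ?_⟩
      rcases Nat.eq_or_lt_of_le hk2 with rfl | hlt
      · exact hhit
      · exact h3 k hk1 (by omega)

-- the two-insertion splice identity: inserting right then left equals
-- inserting left then right-shifted-by-one
lemma pv_splice (u di dj : List Char) (i j : Nat) (hij : i < j) (hj : j ≤ u.length)
    (hdi : di.length = 1) :
    List.take (j + 1) (List.take i u ++ di ++ List.drop i u) ++ dj ++
      List.drop (j + 1) (List.take i u ++ di ++ List.drop i u)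
    = List.take i (List.take j u ++ dj ++ List.drop j u) ++ di ++
      List.drop i (List.take j u ++ dj ++ List.drop j u) := by
  have hi : (List.take i u).length = i := by rw [List.length_take]; omega
  have hjlen : (List.take j u).length = j := by rw [List.length_take]; omega
  have e1 : List.take (j + 1) (List.take i u) = List.take i u := by
    rw [List.take_take]
    congr 1
    omega
  have hL1 : List.take (j + 1) (List.take i u ++ di ++ List.drop i u)
      = List.take i u ++ (di ++ List.take (j - i) (List.drop i u)) := by
    rw [List.append_assoc, List.take_append, hi, e1, List.take_append,
      List.take_of_length_le (i := j + 1 - i) (l := di) (by omega), hdi]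
    have harith : j + 1 - i - 1 = j - i := by omega
    rw [harith]
  have hL2 : List.drop (j + 1) (List.take i u ++ di ++ List.drop i u) = List.drop j u := by
    rw [List.append_assoc, List.drop_append, hi,
      List.drop_eq_nil_of_le (as := List.take i u) (i := j + 1) (by rw [hi]; omega),
      List.nil_append, List.drop_append, hdi,
      List.drop_eq_nil_of_le (as := di) (i := j + 1 - i) (by omega),
      List.nil_append, List.drop_drop]
    congr 1
    omega
  have hR1 : List.take i (List.take j u ++ dj ++ List.drop j u) = List.take i u := by
    rw [List.append_assoc, List.take_append, hjlen, Nat.sub_eq_zero_of_le (by omega),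
      List.take_zero, List.append_nil, List.take_take]
    congr 1
    omega
  have hR2 : List.drop i (List.take j u ++ dj ++ List.drop j u)
      = List.take (j - i) (List.drop i u) ++ (dj ++ List.drop j u) := by
    rw [List.append_assoc, List.drop_append, hjlen, Nat.sub_eq_zero_of_le (by omega),
      List.drop_zero, List.drop_take]
  rw [hL1, hL2, hR1, hR2]
  simp [List.append_assoc]

-- the per-string equality
lemma pv_one_eq (cs : List Char) : pvAOne cs = pvBOne cs := by
  by_cases hE : ∃ i, (pvHit cs i).isSome
  · -- some word occurs: both sides insert at the least and greatest hit positions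
    obtain ⟨i0, hi0⟩ := hE
    -- B's left scan succeeds
    cases hL : pvScanL cs 0 with
    | none =>
      exfalso
      have := pvScanL_none (cs.length - 0) 0 rfl hL i0 (Nat.zero_le _)
      rw [this] at hi0; simp at hi0
    | some r =>
      obtain ⟨i, di⟩ := r
      obtain ⟨-, ⟨wi, hwi, hdi⟩, hminL⟩ := pvScanL_some (cs.length - 0) 0 rfl hL
      obtain ⟨hwiMem, hwiPre, hilen⟩ := pvHit_some hwi
      have hmin : ∀ k, (pvHit cs k).isSome → i ≤ k := by
        intro k hk
        by_contra hlt
        rw [hminL k (Nat.zero_le _) (by omega)] at hk; simp at hk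
      -- B's right scan succeeds
      cases hR : pvScanR cs (cs.length - 1) with
      | none =>
        exfalso
        have := pvScanR_none (cs.length - 1) hR i (by omega)
        rw [this] at hwi; simp at hwi
      | some r =>
        obtain ⟨j, dj⟩ := r
        obtain ⟨hjle, ⟨wj, hwj, hdj⟩, hmaxR⟩ := pvScanR_some (cs.length - 1) hR
        obtain ⟨hwjMem, hwjPre, hjlen⟩ := pvHit_some hwj
        have hmax : ∀ k, (pvHit cs k).isSome → k ≤ j := by
          intro k hk
          by_contra hgt
          by_cases hklen : k ≤ cs.length - 1
          · rw [hmaxR k (by omega) hklen] at hk; simp at hk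
          · rw [pvHit_eq_none_of_ge (by omega)] at hk; simp at hk
        have hij : i ≤ j := hmax i (by rw [hwi]; rfl)
        -- A's dict facts
        have hget_i : (pvD cs).get? (i : Int) = some wi.2 := by
          rw [pvD_get?_natCast, hwi]; rfl
        have hget_j : (pvD cs).get? (j : Int) = some wj.2 := by
          rw [pvD_get?_natCast, hwj]; rfl
        have hsize : (pvD cs).size ≠ 0 := by
          intro h0
          rw [pv_get?_of_size_zero h0] at hget_i
          simp at hget_i
        have hkeys_ne : (pvD cs).keys ≠ [] := by
          intro h
          rw [pv_size_eq, h] at hsize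
          exact hsize rfl
        -- min and max of the keys are i and j
        have hkey_bound : ∀ p ∈ (pvD cs).keys, (i : Int) ≤ p ∧ p ≤ (j : Int) := by
          intro p hp
          have hps := (pv_mem_keys_iff _ _).mp hp
          obtain ⟨hp0, hphit⟩ := pvD_get?_isSome hps
          have h1 := hmin _ hphit
          have h2 := hmax _ hphit
          omega
        have hmem_i : (i : Int) ∈ (pvD cs).keys :=
          (pv_mem_keys_iff _ _).mpr (by rw [hget_i]; rfl)
        have hmem_j : (j : Int) ∈ (pvD cs).keys :=
          (pv_mem_keys_iff _ _).mpr (by rw [hget_j]; rfl)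
        -- evaluate A
        show pvAOne cs = _
        unfold pvAOne
        have hDdef : pvWords.foldl (fun mm n => pvAInner cs n mm) PySem.Dict.empty = pvD cs := rfl
        rw [hDdef]
        rw [if_pos hsize]
        cases hMax : PySem.List.max? (pvD cs).keys (fun x => x) with
        | none => exact absurd ((PySem.List.max?_eq_none_iff _ _).mp hMax) hkeys_ne
        | some X =>
          cases hMin : PySem.List.min? (pvD cs).keys (fun x => x) with
          | none => exact absurd ((PySem.List.min?_eq_none_iff _ _).mp hMin) hkeys_ne
          | some M =>
            have hMeq : M = (i : Int) := by
              have h1 := PySem.List.min?_isMin hMin _ hmem_i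
              have h2 := (hkey_bound M (PySem.List.min?_mem hMin)).1
              omega
            have hXeq : X = (j : Int) := by
              have h1 := PySem.List.max?_isMax hMax _ hmem_j
              have h2 := (hkey_bound X (PySem.List.max?_mem hMax)).2
              omega
            subst hMeq hXeq
            have hgetD_i : (pvD cs).getD (i : Int) [] = di := by
              rw [PySem.Dict.getD_eq_get?_getD, hget_i, hdi]; rfl
            have hgetD_j : (pvD cs).getD (j : Int) [] = dj := by
              rw [PySem.Dict.getD_eq_get?_getD, hget_j, hdj]; rfl
            -- evaluate B
            rw [pvBOne, hL, hR]
            simp only [PySem.Chars.slice_eq_listSlice, PySem.List.slice_to_natCast,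
              PySem.List.slice_from_natCast, hgetD_i, hgetD_j] at *
            by_cases hije : i = j
            · -- a single hit position: A's dict has one key, B skips the right insertion
              subst hije
              have hsize1 : ¬ (pvD cs).size > 1 := by
                have hnd := pvD_nodup cs
                rcases hk : (pvD cs).keys with - | ⟨a, as⟩
                · exact absurd hk hkeys_ne
                · have ha : a = (i : Int) := by
                    have := hkey_bound a (by rw [hk]; exact List.mem_cons_self)
                    omega
                  have has : as = [] := by
                    cases hask : as with
                    | nil => rfl
                    | cons b bs =>
                      exfalso
                      have hb : b = (i : Int) := by
                        have := hkey_bound b (by rw [hk, hask]; simp)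
                        omega
                      rw [hk, hask] at hnd
                      rw [List.nodup_cons] at hnd
                      exact hnd.1 (by rw [ha, ← hb]; simp)
                  rw [pv_size_eq, hk, has]
                  simp
              rw [if_neg hsize1, if_neg (by simp)]
            · -- two distinct hit positions
              have hilj : i < j := by omega
              have hsize2 : (pvD cs).size > 1 := by
                rw [pv_size_eq]
                rcases hk : (pvD cs).keys with - | ⟨a, as⟩
                · exact absurd hk hkeys_ne
                · cases hask : as with
                  | nil =>
                    exfalso
                    rw [hk, hask] at hmem_i hmem_j
                    simp at hmem_i hmem_j
                    omega
                  | cons b bs => simp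
              rw [if_pos hsize2, if_pos (by omega)]
              have hcast : (j : Int) + 1 = ((j + 1 : Nat) : Int) := by push_cast; ring
              rw [hcast]
              simp only [PySem.List.slice_to_natCast, PySem.List.slice_from_natCast]
              have hdilen : di.length = 1 := by rw [hdi]; exact pv_words_digit wi hwiMem
              exact pv_splice cs di dj i j hilj (by omega) hdilen
  · -- no word occurs anywhere: both sides return the string unchanged
    have hall : ∀ i, pvHit cs i = none := by
      intro i
      cases h : pvHit cs i with
      | none => rfl
      | some w => exact absurd ⟨i, by rw [h]; rfl⟩ hE
    have hsize0 : (pvD cs).size = 0 := by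
      by_contra h
      obtain ⟨k, hk⟩ := pv_exists_of_size_ne_zero h
      obtain ⟨hk0, hkh⟩ := pvD_get?_isSome hk
      rw [hall] at hkh; simp at hkh
    have hA : pvAOne cs = cs := by
      unfold pvAOne
      have hDdef : pvWords.foldl (fun mm n => pvAInner cs n mm) PySem.Dict.empty = pvD cs := rfl
      rw [hDdef, if_neg (by simp [hsize0])]
    have hB : pvBOne cs = cs := by
      unfold pvBOne
      cases hL : pvScanL cs 0 with
      | none => rfl
      | some r =>
        obtain ⟨i, di⟩ := r
        obtain ⟨-, ⟨w, hw, -⟩, -⟩ := pvScanL_some (cs.length - 0) 0 rfl hL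
        rw [hall] at hw
        simp at hw
    rw [hA, hB]

-- ===== VERDICT (by name: the statement is the Claim_ definition above) =====
theorem input_prep2_spec : Claim_equal_input_prep2 := by
  intro l _
  unfold Spec_input_prep2 input_prep2 input_prep2_alt
  rw [PySem.List.foldl_append_singleton_eq_map]
  simp only [List.nil_append]
  exact List.map_congr_left (fun s _ => by rw [pv_one_eq])
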